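-- pv_equiv track=rewrite | github.com/ev-br/mc_lib | mc_lib/lattices/_cubic.py | get_neighbors_root_two
-- ===== SOURCE A (Python) =====
-- def get_site(coord, L):
--     """Get the site index from the 3-vector of coordinates."""
--     # XXX: 3D hardcoded, can do N-D
--     return coord[0] * L[1] * L[2] + coord[1] * L[2] + coord[2]
--
-- def get_coord(site, L):
--     """Get the 3-vector of coordinates from the site index."""
--     # XXX: 3D hardcoded, can do N-D
--     x = site // (L[1]*L[2])
--     yz = site % (L[1]*L[2])
--     y = yz // L[2]
--     z = yz % L[2]
--     return [x, y, z]
--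
-- def get_neighbors_root_two(site, L):
--     """Chess king moves in 3D."""
--     neighb = set()
--     x, y, z = get_coord(site, L)
--     for i in [-1, 0, 1]:
--         for j in [-1, 0, 1]:
--             for k in [-1, 0, 1]:
--                 x1 = (x + i) % L[0]
--                 y1 = (y + j) % L[1]
--                 z1 = (z + k) % L[2]
--                 neighb.add(get_site([x1, y1, z1], L))
--     return list(neighb)
-- ===== SOURCE B (Python) =====
-- def get_neighbors_root_two(site, L):
--     """Chess king moves in 3D, computed by a dimension-generic recursion over the axes."""
--     dims = [L[0], L[1], L[2]]
--
--     def coords(s, ds):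
--         if len(ds) == 1:
--             return [s]
--         stride = 1
--         for d in ds[1:]:
--             stride *= d
--         return [s // stride] + coords(s % stride, ds[1:])
--
--     def neighbors(cs, ds):
--         if not ds:
--             return [0]
--         stride = 1
--         for d in ds[1:]:
--             stride *= d
--         tails = neighbors(cs[1:], ds[1:])
--         return [((cs[0] + d) % ds[0]) * stride + t for d in (-1, 0, 1) for t in tails]
--
--     return list(set(neighbors(coords(site, dims), dims)))
-- ===== Notes on version B (the rewrite author's own statement) =====
-- stated objective: alternative
-- what changed: B replaces A's hardcoded 3x3x3 nested offset loops (with get_coord/get_site helper calls and 81 modulo operations) by a dimension-generic recursion: it decomposes the site into coordinates recursively and builds the neighbor index list axis by axis, computing each inner axis's tail list once and combining it with the current axis's three wrapped coordinates (9 modulo operations).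
import Mathlib
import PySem

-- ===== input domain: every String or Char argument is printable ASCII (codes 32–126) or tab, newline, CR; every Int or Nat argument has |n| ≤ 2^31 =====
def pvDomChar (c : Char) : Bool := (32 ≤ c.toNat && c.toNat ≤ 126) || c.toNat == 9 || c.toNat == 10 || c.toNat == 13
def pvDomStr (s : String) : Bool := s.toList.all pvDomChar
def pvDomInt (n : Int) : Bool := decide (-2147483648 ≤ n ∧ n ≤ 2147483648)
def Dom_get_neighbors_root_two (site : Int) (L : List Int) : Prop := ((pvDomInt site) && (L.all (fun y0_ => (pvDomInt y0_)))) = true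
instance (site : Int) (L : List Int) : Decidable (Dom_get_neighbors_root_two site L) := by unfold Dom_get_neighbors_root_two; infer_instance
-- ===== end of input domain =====

-- B builds the neighbor list by a dimension-generic recursion over the axes (coordinates decomposed
-- recursively, per-axis tail lists computed once and combined) instead of A's hardcoded 3×3×3 nested
-- offset loops with per-iteration get_coord/get_site helper calls; return value only (no mutation).

-- ===== PORT A =====
def pvGetSite (coord : List Int) (L : List Int) : Int :=
  PySem.List.pyGetD coord 0 0 * PySem.List.pyGetD L 1 0 * PySem.List.pyGetD L 2 0
    + PySem.List.pyGetD coord 1 0 * PySem.List.pyGetD L 2 0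
    + PySem.List.pyGetD coord 2 0

def pvGetCoord (site : Int) (L : List Int) : List Int :=
  let x := PySem.Int.floordiv site (PySem.List.pyGetD L 1 0 * PySem.List.pyGetD L 2 0)
  let yz := PySem.Int.mod site (PySem.List.pyGetD L 1 0 * PySem.List.pyGetD L 2 0)
  let y := PySem.Int.floordiv yz (PySem.List.pyGetD L 2 0)
  let z := PySem.Int.mod yz (PySem.List.pyGetD L 2 0)
  [x, y, z]

def get_neighbors_root_two (site : Int) (L : List Int) : List Int :=
  match pvGetCoord site L with
  | [x, y, z] =>
      ([-1, 0, 1] : List Int).foldl (fun s i =>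
        ([-1, 0, 1] : List Int).foldl (fun s j =>
          ([-1, 0, 1] : List Int).foldl (fun s k =>
            let x1 := PySem.Int.mod (x + i) (PySem.List.pyGetD L 0 0)
            let y1 := PySem.Int.mod (y + j) (PySem.List.pyGetD L 1 0)
            let z1 := PySem.Int.mod (z + k) (PySem.List.pyGetD L 2 0)
            PySem.Set.add s (pvGetSite [x1, y1, z1] L)) s) s) (PySem.Set.empty)
  | _ => []  -- unreachable: pvGetCoord always returns a 3-list (Python's `x, y, z = …` destructuring)

-- ===== PORT B =====
-- `stride = 1; for d in ds[1:]: stride *= d` of Source B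
def pvProd (ds : List Int) : Int := ds.foldl (· * ·) 1

-- Source B's recursive `coords(s, ds)`; the `[]` case is unreachable in Source B (coords is only
-- called with the nonempty 3-list dims and recurses down to the 1-list base case).
def pvCoords (s : Int) (ds : List Int) : List Int :=
  if ds.length == 1 then [s]
  else
    match ds with
    | [] => [s]        -- unreachable in Source B (coords only sees nonempty suffixes of the 3-list dims)
    | _ :: rest => PySem.Int.floordiv s (pvProd rest) :: pvCoords (PySem.Int.mod s (pvProd rest)) rest

-- Source B's recursive `neighbors(cs, ds)`; `cs[1:]` is `cs.drop 1` (exact for a nonnegative start),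
-- `cs[0]` is pyGetD (cs is nonempty whenever ds is, by construction).
def pvNeighbors (cs : List Int) (ds : List Int) : List Int :=
  match ds with
  | [] => [0]
  | d :: rest =>
      let stride := pvProd rest
      let tails := pvNeighbors (cs.drop 1) rest
      ([-1, 0, 1] : List Int).flatMap (fun dlt =>
        tails.map (fun t => PySem.Int.mod (PySem.List.pyGetD cs 0 0 + dlt) d * stride + t))

def get_neighbors_root_two_alt (site : Int) (L : List Int) : List Int :=
  let dims := [PySem.List.pyGetD L 0 0, PySem.List.pyGetD L 1 0, PySem.List.pyGetD L 2 0]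
  PySem.Set.ofList (pvNeighbors (pvCoords site dims) dims)

-- ===== PRECONDITION & SPEC =====
-- Pre_ excludes exactly the inputs where Python A raises: len(L) < 3 (IndexError) and a zero
-- among L[0], L[1], L[2] (ZeroDivisionError in `%` / `//`); B raises there too.
def Pre_get_neighbors_root_two (site : Int) (L : List Int) : Prop :=
  3 ≤ L.length ∧ L.getD 0 0 ≠ 0 ∧ L.getD 1 0 ≠ 0 ∧ L.getD 2 0 ≠ 0
instance (site : Int) (L : List Int) : Decidable (Pre_get_neighbors_root_two site L) := by
  unfold Pre_get_neighbors_root_two; infer_instance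

def pvWitness_get_neighbors_root_two : Int × List Int := (5, [3, 3, 3])

def Spec_get_neighbors_root_two (site : Int) (L : List Int) (out : List Int) : Prop := out = get_neighbors_root_two_alt site L
instance (site : Int) (L : List Int) (out : List Int) : Decidable (Spec_get_neighbors_root_two site L out) := by unfold Spec_get_neighbors_root_two; infer_instance

-- ===== CLAIM (what is proved, stated in full; the proofs are below) =====
def Claim_equal_get_neighbors_root_two : Prop := ∀ (site : Int) (L : List Int), Dom_get_neighbors_root_two site L → Pre_get_neighbors_root_two site L → Spec_get_neighbors_root_two site L (get_neighbors_root_two site L)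

-- ===== LEMMAS AND PROOFS =====

-- ===== VERDICT (by name: the statement is the Claim_ definition above) =====
-- Both sides are evaluated to an explicit chain of 27 PySem.Set.add insertions (simp unfolds the
-- nested folds of A and the dimension recursion of B); the inserted values coincide, in order, up
-- to ring identities (associativity, *1, +0), so ring_nf closes the goal.
set_option maxHeartbeats 1600000 in
theorem get_neighbors_root_two_spec : Claim_equal_get_neighbors_root_two := by
  intro site L _ _
  unfold Spec_get_neighbors_root_two
  unfold get_neighbors_root_two get_neighbors_root_two_alt pvGetCoord pvGetSite
  simp [pvNeighbors, pvCoords, pvProd, PySem.List.pyGetD_ofNat', List.getD_cons_succ,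
    List.getD_cons_zero, List.foldl_cons, List.foldl_nil, List.drop_succ_cons, List.drop_zero,
    List.flatMap_cons, List.flatMap_nil, List.map_cons, List.map_nil, List.append_nil,
    List.cons_append, List.nil_append, PySem.Set.ofList_eq_foldl, PySem.Set.empty, one_mul]
  ring_nf
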